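-- pv_equiv track=rewrite | github.com/castlhoo/Python-CodingTest | May/6_May/Re-re_Example_6_3.py | solutions1
-- ===== SOURCE A (Python) =====
-- def solutions1(nums, k):
--     n = len(nums)
--     answer = 0
--
--     for i in range(k+1):
--         sumN = 0
--         for j in range(i):
--             sumN += nums[j]
--         for j in range(n-k+i, n):
--             sumN += nums[j]
--
--         answer = max(answer, sumN)
--
--     return answer
-- ===== SOURCE B (Python) =====
-- def solutions1(nums, k):
--     n = len(nums)
--     pref = [0]
--     for x in nums:
--         pref.append(pref[-1] + x)
--     total = pref[n]
--     best = 0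
--     for i in range(k + 1):
--         best = max(best, pref[i] + total - pref[n - k + i])
--     return best
-- ===== Notes on version B (the rewrite author's own statement) =====
-- stated objective: faster
-- what changed: B builds a prefix-sum array once and evaluates each split point in O(1) as pref[i] + total - pref[n-k+i], instead of re-summing the whole prefix and suffix from scratch for every i.
import Mathlib
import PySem

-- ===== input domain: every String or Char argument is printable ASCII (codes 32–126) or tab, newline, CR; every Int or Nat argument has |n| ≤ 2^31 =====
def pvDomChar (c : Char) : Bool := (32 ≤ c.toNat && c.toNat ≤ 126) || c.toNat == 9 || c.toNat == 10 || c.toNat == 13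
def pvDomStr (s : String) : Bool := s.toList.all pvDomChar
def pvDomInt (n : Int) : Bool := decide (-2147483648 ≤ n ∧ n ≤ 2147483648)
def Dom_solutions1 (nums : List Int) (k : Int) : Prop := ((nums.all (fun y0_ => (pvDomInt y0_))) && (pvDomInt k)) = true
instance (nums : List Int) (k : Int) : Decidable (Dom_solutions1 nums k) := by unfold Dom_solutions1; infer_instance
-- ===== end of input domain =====

-- B replaces A's per-split re-summation by a prefix-sum array (O(n+k) instead of O(k*n)).

-- ===== PORT A =====
-- nums[j] is ported as pyGetD nums j 0 — exact wherever the index is in range, which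
-- Pre_solutions1 (k ≤ len nums) guarantees; outside Pre_ the Python raises IndexError.
def solutions1 (nums : List Int) (k : Int) : Int :=
  let n : Int := nums.length
  (PySem.List.pyRange 0 (k + 1) 1).foldl (fun answer i =>
    let s1 := (PySem.List.pyRange 0 i 1).foldl
      (fun sumN j => sumN + PySem.List.pyGetD nums j 0) 0
    let s2 := (PySem.List.pyRange (n - k + i) n 1).foldl
      (fun sumN j => sumN + PySem.List.pyGetD nums j 0) s1
    max answer s2) 0

-- ===== PORT B =====
def solutions1_alt (nums : List Int) (k : Int) : Int :=
  let n : Int := nums.length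
  let pref := nums.foldl (fun p x => p ++ [PySem.List.pyGetD p (-1) 0 + x]) [0]
  let total := PySem.List.pyGetD pref n 0
  (PySem.List.pyRange 0 (k + 1) 1).foldl (fun best i =>
    max best (PySem.List.pyGetD pref i 0 + total - PySem.List.pyGetD pref (n - k + i) 0)) 0

-- ===== PRECONDITION & SPEC =====
-- Pre_ excludes only k > len(nums): there A's prefix loop reaches nums[len(nums)] and
-- raises IndexError (B raises there as well).
def Pre_solutions1 (nums : List Int) (k : Int) : Prop := k ≤ (nums.length : Int)
instance (nums : List Int) (k : Int) : Decidable (Pre_solutions1 nums k) := by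
  unfold Pre_solutions1; infer_instance
def pvWitness_solutions1 : List Int × Int := ([3, -1, 4, -2], 2)

def Spec_solutions1 (nums : List Int) (k : Int) (out : Int) : Prop := out = solutions1_alt nums k
instance (nums : List Int) (k : Int) (out : Int) : Decidable (Spec_solutions1 nums k out) := by
  unfold Spec_solutions1; infer_instance

-- ===== CLAIM (what is proved, stated in full; the proofs are below) =====
def Claim_equal_solutions1 : Prop := ∀ (nums : List Int) (k : Int), Dom_solutions1 nums k → Pre_solutions1 nums k → Spec_solutions1 nums k (solutions1 nums k)

-- ===== LEMMAS AND PROOFS =====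

-- running prefix sums starting after accumulated sum s
def scanSums (s : Int) : List Int → List Int
  | [] => []
  | x :: t => (s + x) :: scanSums (s + x) t

theorem scanSums_ne_nil_aux (l : List Int) (p : List Int) (hp : p ≠ []) :
    l.foldl (fun p x => p ++ [PySem.List.pyGetD p (-1) 0 + x]) p
      = p ++ scanSums (p.getLast hp) l := by
  induction l generalizing p with
  | nil => simp [scanSums]
  | cons x t ih =>
    simp only [List.foldl_cons]
    rw [PySem.List.pyGetD_neg_one (h := hp)]
    rw [ih (p ++ [p.getLast hp + x]) (by simp)]
    simp [scanSums]

theorem scan_getD (l : List Int) (s : Int) (m : Nat) (hm : m ≤ l.length) :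
    (s :: scanSums s l).getD m 0 = s + (l.take m).sum := by
  induction l generalizing s m with
  | nil =>
    have : m = 0 := by simp at hm; omega
    subst this; simp
  | cons x t ih =>
    cases m with
    | zero => simp
    | succ m' =>
      simp only [scanSums, List.getD_cons_succ, List.take_succ_cons, List.sum_cons]
      rw [ih (s + x) m' (by simpa using hm)]
      ring

theorem map_pyGetD_range (nums : List Int) (a b : Int) (h0 : 0 ≤ a) (hab : a ≤ b)
    (hb : b ≤ (nums.length : Int)) :
    (PySem.List.pyRange a b 1).map (fun j => PySem.List.pyGetD nums j 0)
      = (nums.drop a.toNat).take (b - a).toNat := by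
  rw [PySem.List.pyRange_one, List.map_map]
  apply List.ext_getElem
  · simp; omega
  · intro i h1 h2
    simp only [List.getElem_map, List.getElem_range, Function.comp_apply]
    have hlen : i < nums.length - a.toNat := by simp at h2; omega
    have hcast : a + (i : Int) = ((a.toNat + i : Nat) : Int) := by omega
    rw [hcast, PySem.List.pyGetD_natCast]
    rw [List.getElem_take, List.getElem_drop]
    rw [List.getD_eq_getElem _ _ (by omega)]

theorem pref_getD (nums : List Int) (i : Int) (h0 : 0 ≤ i) (hi : i ≤ (nums.length : Int)) :
    PySem.List.pyGetD (nums.foldl (fun p x => p ++ [PySem.List.pyGetD p (-1) 0 + x]) [0]) i 0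
      = (nums.take i.toNat).sum := by
  rw [scanSums_ne_nil_aux nums [0] (by simp)]
  have hform : ([0] : List Int) ++ scanSums (List.getLast [0] (by simp)) nums
      = (0 : Int) :: scanSums 0 nums := by simp
  rw [hform]
  rw [show i = ((i.toNat : Nat) : Int) from by omega, PySem.List.pyGetD_natCast]
  rw [scan_getD nums 0 i.toNat (by omega)]
  simp only [zero_add, Int.toNat_natCast]

theorem sum_foldl_add (l : List Int) (g : Int → Int) (a : Int) :
    l.foldl (fun acc x => acc + g x) a = a + (l.map g).sum :=
  PySem.List.foldl_add l g a

-- ===== VERDICT (by name: the statement is the Claim_ definition above) =====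
theorem solutions1_spec : Claim_equal_solutions1 := by
  intro nums k _ hpre
  unfold Spec_solutions1 solutions1 solutions1_alt
  simp only []
  apply PySem.List.foldl_congr_mem
  intro acc i hi
  rw [PySem.List.mem_pyRange_one] at hi
  obtain ⟨hi0, hik⟩ := hi
  have hkn : k ≤ (nums.length : Int) := hpre
  have hik' : i ≤ k := by omega
  -- A's inner sums
  rw [sum_foldl_add, sum_foldl_add]
  rw [map_pyGetD_range nums 0 i (le_refl 0) hi0 (by omega)]
  rw [map_pyGetD_range nums ((nums.length : Int) - k + i) (nums.length : Int)
      (by omega) (by omega) (le_refl _)]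
  -- B's lookups
  rw [pref_getD nums i hi0 (by omega)]
  rw [pref_getD nums ((nums.length : Int) - k + i) (by omega) (by omega)]
  rw [pref_getD nums (nums.length : Int) (by omega) (by omega)]
  -- arithmetic identity: take a + drop a = total
  have hsplit : (nums.take ((nums.length : Int) - k + i).toNat).sum
      + (nums.drop ((nums.length : Int) - k + i).toNat).sum = nums.sum := by
    rw [← List.sum_append, List.take_append_drop]
  have htake : (nums.take ((nums.length : Int)).toNat) = nums := by simp
  have hdropall : ((nums.length : Int) - ((nums.length : Int) - k + i)).toNat
      = nums.length - ((nums.length : Int) - k + i).toNat := by omega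
  rw [hdropall]
  have htk : ((nums.drop ((nums.length : Int) - k + i).toNat).take
      (nums.length - ((nums.length : Int) - k + i).toNat))
      = nums.drop ((nums.length : Int) - k + i).toNat := by
    apply List.take_of_length_le; simp
  rw [htk, htake]
  have h0 : (i - 0).toNat = i.toNat := by omega
  rw [h0]
  have hd0 : (nums.drop (0:Int).toNat) = nums := by simp
  rw [hd0]
  omega
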